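-- pv_equiv track=rewrite | github.com/ashbyp/pscratch | algorithms/r/a3.py | solution
-- ===== SOURCE A (Python) =====
-- def solution(A):
--     min_cost = None
--     for i, cost in enumerate(A[1:], start=1):
--         base_cost = A[i]
--         if not min_cost or (min_cost > base_cost):
--             for j in range(i+2, len(A) - 1):
--                 break_cost = base_cost + A[j]
--                 if not min_cost or break_cost < min_cost:
--                     min_cost = break_cost
--
--     return min_cost
-- ===== SOURCE B (Python) =====
-- # One pass over a precomputed suffix-minimum array instead of rescanning A[j] for every i.
-- def solution(A):
--     n = len(A)
--     if n < 5:
--         return None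
--     # suffmin[t] = min(A[t .. n-2])
--     suffmin = A[:n - 1]
--     for t in range(n - 3, -1, -1):
--         if suffmin[t + 1] < suffmin[t]:
--             suffmin[t] = suffmin[t + 1]
--     best = A[1] + suffmin[3]
--     for i in range(2, n - 3):
--         if A[i] < best:
--             c = A[i] + suffmin[i + 2]
--             if c < best:
--                 best = c
--     return best
-- ===== Notes on version B (the rewrite author's own statement) =====
-- stated objective: alternative
-- what changed: A's gated inner rescan over j for every i is replaced by a precomputed suffix-minimum array and a single pass over i; Pre_ excludes lists where some admissible pair A[i]+A[j] sums to exactly 0 with no negative candidate of the i=1 scan before any such zero, because there A's 'not min_cost' truthiness test can treat a running best of 0 as unset and restart the search, an accident of Python falsiness; B returns the gated minimum there.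
-- outside the precondition, e.g. on solution([0, 1, 0, -1, 5, 0]): A returns 5, B returns 0; on solution([7, 5, 7, -5, 5, 7, 7, 7]): A returns 2, B returns 0
import Mathlib
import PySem

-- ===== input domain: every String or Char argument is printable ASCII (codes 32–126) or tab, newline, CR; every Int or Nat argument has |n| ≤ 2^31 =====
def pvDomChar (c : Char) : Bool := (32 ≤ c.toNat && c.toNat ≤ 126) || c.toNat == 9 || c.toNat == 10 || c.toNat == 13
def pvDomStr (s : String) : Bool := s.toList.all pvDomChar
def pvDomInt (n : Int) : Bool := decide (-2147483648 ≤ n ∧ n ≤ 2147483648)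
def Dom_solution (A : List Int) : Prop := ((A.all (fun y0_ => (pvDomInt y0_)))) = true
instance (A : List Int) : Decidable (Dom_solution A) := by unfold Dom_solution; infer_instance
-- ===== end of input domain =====

-- B replaces A's per-i rescan of the tail by a precomputed suffix-minimum array and a single
-- pass over i (objective: alternative); Pre_ excludes the inputs where A's `not min_cost`
-- truthiness test can treat a running best of exactly 0 as unset (see Pre_solution).

-- ===== PORT A =====
-- loop body of A: gate `not min_cost or min_cost > base_cost`, then the inner scan over range(i+2, len(A)-1)
def stepA (A : List Int) (n : Int) (m : Option Int) (i : Int) : Option Int :=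
  let base := PySem.List.pyGetD A i 0              -- A[i]; i is always in range here
  let gate : Bool := match m with
    | none => true                                  -- `not min_cost` (None is falsy)
    | some x => decide (x = 0) || decide (base < x)
  if gate then
    (PySem.List.pyRange (i + 2) (n - 1) 1).foldl
      (fun m' j =>
        let bc := base + PySem.List.pyGetD A j 0    -- break_cost = base_cost + A[j]; j always in range
        match m' with
        | none => some bc                           -- `not min_cost` again
        | some y => if y = 0 ∨ bc < y then some bc else some y)
      m
  else m

-- literal transliteration of A: `for i, cost in enumerate(A[1:], start=1): …` (cost is unused by A's body)
def solution (A : List Int) : Option Int :=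
  let n : Int := PySem.List.len A
  (PySem.List.enumerate (PySem.List.slice A (some 1) none) 1).foldl
    (fun m p => stepA A n m p.1) none

-- ===== PORT B =====
-- suffix-minimum array of Source B (`suffmin[t] = A[t] if A[t] < suffmin[t+1] else suffmin[t+1]`),
-- the right-to-left pass written as structural recursion
def suffMins : List Int → List Int
  | [] => []
  | a :: t =>
    match suffMins t with
    | [] => [a]
    | b :: u => (if a < b then a else b) :: b :: u

-- literal transliteration of Source B
def solution_alt (A : List Int) : Option Int :=
  let n : Int := PySem.List.len A
  if n < 5 then none
  else
    let sm : List Int := suffMins (A.take (n - 1).toNat)   -- suffmin[t] = min(A[t .. n-2])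
    let best0 : Int := PySem.List.pyGetD A 1 0 + PySem.List.pyGetD sm 3 0
    some ((PySem.List.pyRange 2 (n - 3) 1).foldl
      (fun best i =>
        let b := PySem.List.pyGetD A i 0
        if b < best then
          let c := b + PySem.List.pyGetD sm (i + 2) 0
          if c < best then c else best
        else best) best0)

-- ===== PRECONDITION & SPEC =====
-- Pre_ excludes lists where some admissible pair A[i]+A[j] (1 ≤ i, i+2 ≤ j ≤ len(A)-2) sums to
-- exactly 0 and no negative candidate of the i = 1 scan precedes every such zero there:
-- there A's running best can become exactly 0, which `not min_cost` treats as unset, so A's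
-- value depends on that truthiness accident; B returns the gated minimum there.
def Pre_solution (A : List Int) : Prop :=
  (¬ ∃ j < A.length, ∃ i < j,
    1 ≤ i ∧ i + 2 ≤ j ∧ j + 2 ≤ A.length ∧ A.getD i 0 + A.getD j 0 = 0) ∨
  (∃ j < A.length, 3 ≤ j ∧ j + 2 ≤ A.length ∧ A.getD 1 0 + A.getD j 0 < 0 ∧
      ∀ j' < j, 3 ≤ j' → 0 < A.getD 1 0 + A.getD j' 0)
instance (A : List Int) : Decidable (Pre_solution A) := by unfold Pre_solution; infer_instance

def pvWitness_solution : List Int := [1, 2, 3, 4, 5, 6]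

def Spec_solution (A : List Int) (out : Option Int) : Prop := out = solution_alt A
instance (A : List Int) (out : Option Int) : Decidable (Spec_solution A out) := by unfold Spec_solution; infer_instance

-- ===== CLAIM (what is proved, stated in full; the proofs are below) =====
def Claim_equal_solution : Prop := ∀ (A : List Int), Dom_solution A → Pre_solution A → Spec_solution A (solution A)

-- ===== LEMMAS AND PROOFS =====

-- one step of A's inner loop, on the candidate value v = base + A[j]
def istep (m : Option Int) (v : Int) : Option Int :=
  match m with
  | none => some v
  | some y => if y = 0 ∨ v < y then some v else some y

-- min of a nonempty list (0 for [])
def minOf : List Int → Int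
  | [] => 0
  | v :: t => t.foldl min v

lemma foldl_min_assoc (t : List Int) : ∀ x v : Int, t.foldl min (min x v) = min x (t.foldl min v) := by
  induction t with
  | nil => intro x v; rfl
  | cons a t ih =>
    intro x v
    simp only [List.foldl_cons]
    rw [min_assoc, ih]

lemma foldl_min_eq_minOf (vs : List Int) (x : Int) (h : vs ≠ []) :
    vs.foldl min x = min x (minOf vs) := by
  cases vs with
  | nil => exact absurd rfl h
  | cons v t => simp only [List.foldl_cons, minOf]; rw [foldl_min_assoc]

lemma minOf_mem (vs : List Int) (h : vs ≠ []) : minOf vs ∈ vs := by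
  cases vs with
  | nil => exact absurd rfl h
  | cons a t =>
    rcases PySem.List.foldl_min_mem t a with h | h
    · rw [minOf, h]; exact List.mem_cons_self
    · exact List.mem_cons_of_mem a h

lemma minOf_le (vs : List Int) (v : Int) (hv : v ∈ vs) : minOf vs ≤ v := by
  cases vs with
  | nil => cases hv
  | cons a t =>
    rcases List.mem_cons.mp hv with h | h
    · subst h; exact (PySem.List.foldl_min_le t v).1
    · exact (PySem.List.foldl_min_le t a).2 v h

-- negative state: A's inner loop is a plain running minimum, whatever the candidates are
lemma foldA_neg (vs : List Int) : ∀ x : Int, x < 0 →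
    vs.foldl istep (some x) = some (vs.foldl min x) := by
  induction vs with
  | nil => intro x _; rfl
  | cons v t ih =>
    intro x hx
    simp only [List.foldl_cons, istep]
    by_cases hv : v < x
    · rw [if_pos (Or.inr hv), ih v (lt_trans hv hx), min_eq_right (le_of_lt hv)]
    · rw [if_neg (by push Not; exact ⟨by omega, by omega⟩), min_eq_left (by omega), ih x hx]

-- positive state over positive candidates, then (possibly) a negative-headed tail
lemma foldA_mix (P : List Int) : ∀ (S : List Int) (x : Int), 0 < x → (∀ v ∈ P, 0 < v) →
    (S = [] ∨ ∃ w S', S = w :: S' ∧ w < 0) →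
    (P ++ S).foldl istep (some x) = some ((P ++ S).foldl min x) := by
  induction P with
  | nil =>
    intro S x hx _ hS
    rcases hS with rfl | ⟨w, S', rfl, hw⟩
    · rfl
    · simp only [List.nil_append, List.foldl_cons, istep]
      rw [if_pos (Or.inr (by omega)), min_eq_right (by omega)]
      exact foldA_neg S' w hw
  | cons a P ih =>
    intro S x hx hP hS
    have ha : 0 < a := hP a List.mem_cons_self
    have hP' : ∀ v ∈ P, 0 < v := fun v hv => hP v (List.mem_cons_of_mem a hv)
    simp only [List.cons_append, List.foldl_cons, istep]
    by_cases hv : a < x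
    · rw [if_pos (Or.inr hv), min_eq_right (le_of_lt hv)]
      exact ih S a ha hP' hS
    · rw [if_neg (by push Not; exact ⟨by omega, by omega⟩), min_eq_left (by omega)]
      exact ih S x hx hP' hS

-- a positive prefix then a negative candidate: from None the loop is again a plain running minimum
lemma foldA_prefix (P S : List Int) (w : Int) (hP : ∀ v ∈ P, 0 < v) (hw : w < 0) :
    (P ++ w :: S).foldl istep none = some (minOf (P ++ w :: S)) := by
  cases P with
  | nil =>
    simp only [List.nil_append, List.foldl_cons, istep]
    rw [foldA_neg S w hw]; rfl
  | cons a P' =>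
    have ha : 0 < a := hP a List.mem_cons_self
    simp only [List.cons_append, List.foldl_cons, istep]
    rw [foldA_mix P' (w :: S) a ha (fun v hv => hP v (List.mem_cons_of_mem a hv))
      (Or.inr ⟨w, S, rfl, hw⟩)]
    rfl

-- with a never-zero state and never-zero candidates, A's inner loop is a plain running minimum
lemma foldA_clean (vs : List Int) : ∀ x : Int, x ≠ 0 → (∀ v ∈ vs, v ≠ 0) →
    vs.foldl istep (some x) = some (vs.foldl min x) := by
  induction vs with
  | nil => intro x _ _; rfl
  | cons v t ih =>
    intro x hx hv
    have hv0 : v ≠ 0 := hv v List.mem_cons_self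
    have hmin : min x v ≠ 0 := by rcases min_choice x v with h | h <;> rw [h] <;> assumption
    simp only [List.foldl_cons, istep]
    by_cases hlt : v < x
    · rw [if_pos (Or.inr hlt), min_eq_right (le_of_lt hlt)] at *
      exact ih v hv0 (fun u hu => hv u (List.mem_cons_of_mem v hu))
    · rw [if_neg (by push Not; exact ⟨hx, by omega⟩), min_eq_left (by omega)]
      exact ih x hx (fun u hu => hv u (List.mem_cons_of_mem v hu))

lemma foldA_none (vs : List Int) (hne : vs ≠ []) (hv : ∀ v ∈ vs, v ≠ 0) :
    vs.foldl istep none = some (minOf vs) := by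
  cases vs with
  | nil => exact absurd rfl hne
  | cons v t =>
    simp only [List.foldl_cons, istep, minOf]
    exact foldA_clean t v (hv v List.mem_cons_self) (fun u hu => hv u (List.mem_cons_of_mem v hu))

-- ---- suffix-minimum array ----

lemma length_suffMins (xs : List Int) : (suffMins xs).length = xs.length := by
  induction xs with
  | nil => rfl
  | cons a t ih =>
    simp only [suffMins]
    cases h : suffMins t with
    | nil => simp [h ▸ ih]
    | cons b u =>
      have : (suffMins t).length = t.length := ih
      rw [h] at this
      simp only [List.length_cons] at this ⊢
      omega

lemma suffMins_getD (xs : List Int) : ∀ (k : Nat), k < xs.length →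
    (suffMins xs).getD k 0 = minOf (xs.drop k) := by
  induction xs with
  | nil => intro k hk; simp at hk
  | cons a t ih =>
    intro k hk
    simp only [suffMins]
    cases h : suffMins t with
    | nil =>
      have ht : t = [] := List.length_eq_zero_iff.mp (by rw [← length_suffMins, h]; rfl)
      subst ht
      have : k = 0 := by simpa using hk
      subst this
      rfl
    | cons b u =>
      have htne : t ≠ [] := by
        intro hte
        rw [hte] at h
        simp only [suffMins] at h
        exact List.cons_ne_nil b u h.symm
      cases k with
      | zero =>
        have hb : b = minOf t := by
          have := ih 0 (by cases t with | nil => exact absurd rfl htne | cons c r => simp)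
          rw [h] at this; simpa using this
        simp only [List.getD_cons_zero, List.drop_zero, minOf]
        rw [foldl_min_eq_minOf t a htne, ← hb, min_def]
        split_ifs with h1 h2 h2 <;> omega
      | succ k =>
        have hk' : k < t.length := by simpa using hk
        have := ih k hk'
        rw [h] at this
        simpa using this

-- ---- candidate segments ----

-- the candidates b + A[j] for j in [t, u)
def segL (A : List Int) (b t u : Int) : List Int :=
  (PySem.List.pyRange t u 1).map (fun j => b + PySem.List.pyGetD A j 0)

lemma segL_cons (A : List Int) (b t u : Int) (h : t < u) :
    segL A b t u = (b + PySem.List.pyGetD A t 0) :: segL A b (t + 1) u := by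
  unfold segL; rw [PySem.List.pyRange_one_cons h, List.map_cons]

lemma mem_segL (A : List Int) (b t u v : Int) :
    v ∈ segL A b t u ↔ ∃ j, t ≤ j ∧ j < u ∧ v = b + PySem.List.pyGetD A j 0 := by
  unfold segL
  simp only [List.mem_map, PySem.List.mem_pyRange_one]
  constructor
  · rintro ⟨j, ⟨h1, h2⟩, h3⟩; exact ⟨j, h1, h2, h3.symm⟩
  · rintro ⟨j, h1, h2, h3⟩; exact ⟨j, ⟨h1, h2⟩, h3.symm⟩

lemma segL_append (A : List Int) (b t mid u : Int) (h1 : t ≤ mid) (h2 : mid ≤ u) :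
    segL A b t u = segL A b t mid ++ segL A b mid u := by
  unfold segL; rw [PySem.List.pyRange_one_append t mid u h1 h2, List.map_append]

lemma segL_ne_nil (A : List Int) (b t u : Int) (h : t < u) : segL A b t u ≠ [] := by
  rw [segL_cons A b t u h]; exact List.cons_ne_nil _ _

lemma foldl_min_map_add (t : List Int) : ∀ v b : Int,
    (t.map (fun y => b + y)).foldl min (b + v) = b + t.foldl min v := by
  induction t with
  | nil => intro v b; rfl
  | cons a t ih =>
    intro v b
    simp only [List.map_cons, List.foldl_cons]
    rw [show min (b + v) (b + a) = b + min v a from min_add_add_left b v a, ih]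

lemma minOf_map_add (xs : List Int) (b : Int) (h : xs ≠ []) :
    minOf (xs.map (fun y => b + y)) = b + minOf xs := by
  cases xs with
  | nil => exact absurd rfl h
  | cons v t => simp only [List.map_cons, minOf]; exact foldl_min_map_add t v b

-- the suffix-minimum array gives exactly the minimum of a candidate segment
lemma sm_val (A : List Int) (b hi t : Int) (h0 : 0 ≤ t) (ht : t ≤ hi)
    (hhi : hi + 1 ≤ PySem.List.len A) :
    b + PySem.List.pyGetD (suffMins (A.take (hi + 1).toNat)) t 0 = minOf (segL A b t (hi + 1)) := by
  have hlen : (A.take (hi + 1).toNat).length = (hi + 1).toNat := by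
    rw [List.length_take]
    simp only [PySem.List.len_eq] at hhi
    omega
  have hAlen : hi + 1 ≤ (A.length : Int) := by simpa [PySem.List.len_eq] using hhi
  set T := A.take (hi + 1).toNat with hT
  have hTlen : ((T.length : Nat) : Int) = hi + 1 := by rw [hlen]; omega
  have htlt : t.toNat < T.length := by rw [hlen]; omega
  have hsm : PySem.List.pyGetD (suffMins T) t 0 = minOf (T.drop t.toNat) := by
    have hlt2 : t < (((suffMins T).length : Nat) : Int) := by rw [length_suffMins]; omega
    rw [PySem.List.pyGetD_eq_getElem (suffMins T) 0 h0 hlt2,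
      show (suffMins T)[t.toNat] = (suffMins T).getD t.toNat 0 from
        (List.getD_eq_getElem (suffMins T) 0 (by rw [length_suffMins]; exact htlt)).symm]
    exact suffMins_getD T t.toNat htlt
  have hseg : segL A b t (hi + 1) = (T.drop t.toNat).map (fun y => b + y) := by
    unfold segL
    have hcongr : ∀ j ∈ PySem.List.pyRange t (hi + 1) 1,
        b + PySem.List.pyGetD A j 0 = b + PySem.List.pyGetD T j 0 := by
      intro j hj
      rw [PySem.List.mem_pyRange_one] at hj
      have h0j : 0 ≤ j := le_trans h0 hj.1
      rw [PySem.List.pyGetD_eq_getElem A 0 h0j (by omega),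
        PySem.List.pyGetD_eq_getElem T 0 h0j (by omega)]
      congr 1
      exact (List.getElem_take (xs := A)).symm
    rw [List.map_congr_left hcongr]
    have : PySem.List.pyRange t (hi + 1) 1 = PySem.List.pyRange t (PySem.List.len T) 1 := by
      simp only [PySem.List.len_eq]; rw [hTlen]
    rw [this]
    have hmm : (fun j => b + PySem.List.pyGetD T j 0) =
        (fun y => b + y) ∘ (fun j => PySem.List.pyGetD T j 0) := rfl
    rw [hmm, ← List.map_map, PySem.List.map_pyGetD_pyRange T 0 h0]
  rw [hsm, hseg]
  have hne : T.drop t.toNat ≠ [] := by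
    intro h
    have := List.length_drop (l := T) (i := t.toNat)
    rw [h] at this
    simp only [List.length_nil] at this
    omega
  exact (minOf_map_add (T.drop t.toNat) b hne).symm

-- ---- the inner loop of A as a fold over a candidate segment ----

lemma stepA_inner (A : List Int) (n i : Int) (m : Option Int) :
    (PySem.List.pyRange (i + 2) (n - 1) 1).foldl
      (fun m' j =>
        let bc := PySem.List.pyGetD A i 0 + PySem.List.pyGetD A j 0
        match m' with
        | none => some bc
        | some y => if y = 0 ∨ bc < y then some bc else some y)
      m = (segL A (PySem.List.pyGetD A i 0) (i + 2) (n - 1)).foldl istep m := by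
  unfold segL
  rw [List.foldl_map]
  rfl

lemma stepA_none (A : List Int) (n i : Int) :
    stepA A n none i = (segL A (PySem.List.pyGetD A i 0) (i + 2) (n - 1)).foldl istep none := by
  rw [show stepA A n none i = (PySem.List.pyRange (i + 2) (n - 1) 1).foldl
      (fun m' j =>
        let bc := PySem.List.pyGetD A i 0 + PySem.List.pyGetD A j 0
        match m' with
        | none => some bc
        | some y => if y = 0 ∨ bc < y then some bc else some y)
      none from rfl, stepA_inner]

-- ---- no-zero-candidate simulation ----

-- B's loop body, as it appears in solution_alt
def stepB (A : List Int) (sm : List Int) (best : Int) (i : Int) : Int :=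
  let b := PySem.List.pyGetD A i 0
  if b < best then
    let c := b + PySem.List.pyGetD sm (i + 2) 0
    if c < best then c else best
  else best

-- the safety condition carried along B's single pass: either the best is already negative
-- (no reset can ever fire), or no admissible pair sums to 0 at all
def SimSafe (A : List Int) (x : Int) : Prop :=
  x < 0 ∨ ((∀ i j : Int, 1 ≤ i → i + 2 ≤ j → j + 2 ≤ PySem.List.len A →
    PySem.List.pyGetD A i 0 + PySem.List.pyGetD A j 0 ≠ 0) ∧ x ≠ 0)

lemma fold_sim (A : List Int) :
    ∀ (l : List Int) (x : Int), SimSafe A x →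
      (∀ i ∈ l, 1 ≤ i ∧ i < PySem.List.len A - 3) →
      l.foldl (stepA A (PySem.List.len A)) (some x) =
        some (l.foldl (stepB A (suffMins (A.take (PySem.List.len A - 1).toNat))) x) := by
  intro l
  induction l with
  | nil => intro x _ _; rfl
  | cons i l ih =>
    intro x hsafe hl
    have hx : x ≠ 0 := by rcases hsafe with h | ⟨_, h⟩ <;> omega
    obtain ⟨hi1, hi2⟩ := hl i List.mem_cons_self
    set n : Int := PySem.List.len A with hn
    set b : Int := PySem.List.pyGetD A i 0 with hb
    set sm : List Int := suffMins (A.take (n - 1).toNat) with hsm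
    set vs : List Int := segL A b (i + 2) (n - 1) with hvs
    have hvsne : vs ≠ [] := segL_ne_nil A b (i + 2) (n - 1) (by omega)
    have hcval : b + PySem.List.pyGetD sm (i + 2) 0 = minOf vs := by
      have := sm_val A b (n - 2) (i + 2) (by omega) (by omega) (by omega)
      rw [show n - 2 + 1 = n - 1 by ring] at this
      exact this
    have hfold : vs.foldl istep (some x) = some (vs.foldl min x) := by
      rcases hsafe with hneg | ⟨hnz, hx'⟩
      · exact foldA_neg vs x hneg
      · refine foldA_clean vs x hx' ?_
        intro v hv
        obtain ⟨j, hj1, hj2, rfl⟩ := (mem_segL A b (i + 2) (n - 1) v).mp hv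
        exact hnz i j hi1 hj1 (by omega)
    have hstep : stepA A n (some x) i = some (stepB A sm x i) := by
      simp only [stepA, stepB, ← hb]
      rw [show (decide (x = 0) || decide (b < x)) = decide (b < x) by
        simp [decide_eq_false hx]]
      by_cases hbx : b < x
      · rw [if_pos (by simpa using hbx), if_pos hbx, stepA_inner, ← hb, ← hvs,
          hfold, foldl_min_eq_minOf vs x hvsne]
        rw [← hcval]
        congr 1
        rcases le_or_gt x (b + PySem.List.pyGetD sm (i + 2) 0) with h | h
        · rw [min_eq_left h, if_neg (by omega)]
        · rw [min_eq_right (le_of_lt h), if_pos h]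
      · rw [if_neg (by simpa using hbx), if_neg hbx]
    have hnext : SimSafe A (stepB A sm x i) := by
      have hval : stepB A sm x i = x ∨ stepB A sm x i = minOf vs := by
        simp only [stepB, ← hb]
        by_cases hbx : b < x
        · rw [if_pos hbx]
          by_cases hc : b + PySem.List.pyGetD sm (i + 2) 0 < x
          · rw [if_pos hc, hcval]; right; rfl
          · rw [if_neg hc]; left; rfl
        · rw [if_neg hbx]; left; rfl
      rcases hsafe with hneg | ⟨hnz, hx'⟩
      · left
        have hle : stepB A sm x i ≤ x := by
          rcases hval with h | h
          · omega
          · simp only [stepB, ← hb] at h ⊢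
            by_cases hbx : b < x
            · rw [if_pos hbx]
              by_cases hc : b + PySem.List.pyGetD sm (i + 2) 0 < x
              · rw [if_pos hc]; omega
              · rw [if_neg hc]
            · rw [if_neg hbx]
        omega
      · right
        refine ⟨hnz, ?_⟩
        rcases hval with h | h
        · rw [h]; exact hx'
        · rw [h]
          have hmem := minOf_mem vs hvsne
          obtain ⟨j, hj1, hj2, heq⟩ := (mem_segL A b (i + 2) (n - 1) (minOf vs)).mp (hvs ▸ hmem)
          rw [heq]
          exact hnz i j hi1 hj1 (by omega)
    rw [List.foldl_cons, List.foldl_cons, hstep]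
    exact ih (stepB A sm x i) hnext (fun u hu => hl u (List.mem_cons_of_mem i hu))

-- ---- outer glue ----

lemma stepA_id (A : List Int) (n i : Int) (m : Option Int) (h : n - 1 ≤ i + 2) :
    stepA A n m i = m := by
  unfold stepA
  rw [PySem.List.pyRange_one_eq_nil (by omega)]
  cases m with
  | none => simp
  | some x => by_cases hx : (decide (x = 0) || decide (PySem.List.pyGetD A i 0 < x)) = true <;> simp [hx]

lemma foldl_stepA_id (A : List Int) (n : Int) (l : List Int) (m : Option Int)
    (h : ∀ i ∈ l, n - 1 ≤ i + 2) : l.foldl (stepA A n) m = m := by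
  induction l generalizing m with
  | nil => rfl
  | cons a t ih =>
    rw [List.foldl_cons, stepA_id A n a m (h a List.mem_cons_self)]
    exact ih m (fun i hi => h i (List.mem_cons_of_mem a hi))

lemma solution_eq_fold (A : List Int) :
    solution A = (PySem.List.pyRange 1 (PySem.List.len A) 1).foldl (stepA A (PySem.List.len A)) none := by
  unfold solution
  show (PySem.List.enumerate (PySem.List.slice A (some 1) none) 1).foldl
      (fun m p => stepA A (PySem.List.len A) m p.1) none = _
  rw [← List.foldl_map (f := fun p : Int × Int => p.1) (g := stepA A (PySem.List.len A))]
  rw [show ((fun p : Int × Int => p.1) = (Prod.fst : Int × Int → Int)) from rfl]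
  rw [PySem.List.map_fst_enumerate]
  rw [PySem.List.slice_from_one]
  cases A with
  | nil =>
    rw [PySem.List.pyRange_one_eq_nil (by simp), PySem.List.pyRange_one_eq_nil (by simp)]
  | cons a t =>
    congr 2
    simp only [PySem.List.len_eq, List.tail_cons, List.length_cons]
    push_cast
    ring

lemma pyGetD_toNat (A : List Int) (t : Int) (h0 : 0 ≤ t) (hlt : t < (A.length : Int)) :
    PySem.List.pyGetD A t 0 = A.getD t.toNat 0 := by
  rw [PySem.List.pyGetD_eq_getElem A 0 h0 (by omega), List.getD_eq_getElem A 0 (by omega)]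

-- when no admissible pair sums to 0
lemma no_zero_pair (A : List Int)
    (hz : ¬ ∃ j < A.length, ∃ i < j,
      1 ≤ i ∧ i + 2 ≤ j ∧ j + 2 ≤ A.length ∧ A.getD i 0 + A.getD j 0 = 0) :
    ∀ i j : Int, 1 ≤ i → i + 2 ≤ j → j + 2 ≤ PySem.List.len A →
      PySem.List.pyGetD A i 0 + PySem.List.pyGetD A j 0 ≠ 0 := by
  intro i j h1 h2 h3 hsum
  simp only [PySem.List.len_eq] at h3
  apply hz
  refine ⟨j.toNat, by omega, i.toNat, by omega, by omega, by omega, by omega, ?_⟩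
  rw [← pyGetD_toNat A i (by omega) (by omega), ← pyGetD_toNat A j (by omega) (by omega)]
  exact hsum

-- ===== VERDICT (by name: the statements are the Claim_ definitions above) =====
theorem solution_spec : Claim_equal_solution := by
  intro A _ hpre
  unfold Spec_solution
  rw [solution_eq_fold]
  unfold solution_alt
  have hnA : PySem.List.len A = (A.length : Int) := by simp [PySem.List.len_eq]
  by_cases hn5 : PySem.List.len A < 5
  · rw [if_pos hn5]
    exact foldl_stepA_id A (PySem.List.len A) _ none
      (fun i hi => by rw [PySem.List.mem_pyRange_one] at hi; omega)
  · rw [if_neg hn5]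
    push Not at hn5
    -- split the outer range: index 1 first, then the productive part [2, n-3), then the trailing no-ops
    have hsplit : PySem.List.pyRange 1 (PySem.List.len A) 1 =
        ([1] ++ PySem.List.pyRange 2 (PySem.List.len A - 3) 1) ++
          PySem.List.pyRange (PySem.List.len A - 3) (PySem.List.len A) 1 := by
      rw [show ([1] ++ PySem.List.pyRange 2 (PySem.List.len A - 3) 1) =
          PySem.List.pyRange 1 (PySem.List.len A - 3) 1 by
        rw [PySem.List.pyRange_one_cons
          (show (1 : Int) < PySem.List.len A - 3 by omega)]; norm_num]
      exact PySem.List.pyRange_one_append 1 (PySem.List.len A - 3) (PySem.List.len A)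
        (by omega) (by omega)
    rw [hsplit, List.foldl_append, List.foldl_append]
    rw [foldl_stepA_id A (PySem.List.len A) _ _
      (fun i hi => by rw [PySem.List.mem_pyRange_one] at hi; omega)]
    have hgate1 := stepA_none A (PySem.List.len A) 1
    set b1 : Int := PySem.List.pyGetD A 1 0 with hb1
    set vs1 : List Int := segL A b1 (1 + 2) (PySem.List.len A - 1) with hvs1
    have hvs1' : vs1 = segL A b1 3 (PySem.List.len A - 1) := by rw [hvs1]; norm_num
    have hvs1ne : vs1 ≠ [] := by
      rw [hvs1']; exact segL_ne_nil A b1 3 (PySem.List.len A - 1) (by omega)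
    set sm : List Int := suffMins (A.take (PySem.List.len A - 1).toNat) with hsm
    have hbest0 : b1 + PySem.List.pyGetD sm 3 0 = minOf vs1 := by
      rw [hvs1', hsm]
      have := sm_val A b1 (PySem.List.len A - 2) 3 (by omega) (by omega) (by omega)
      rw [show PySem.List.len A - 2 + 1 = PySem.List.len A - 1 by ring] at this
      exact this
    simp only [List.foldl_cons, List.foldl_nil]
    rw [hgate1]
    by_cases hn6 : PySem.List.len A < 6
    · -- n = 5: the productive range [2, n-3) is empty; the single candidate is adopted as is
      rw [PySem.List.pyRange_one_eq_nil (show PySem.List.len A - 3 ≤ 2 by omega)]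
      simp only [List.foldl_nil]
      have hvs1eq : vs1 = [b1 + PySem.List.pyGetD A 3 0] := by
        rw [hvs1', segL_cons A b1 3 (PySem.List.len A - 1) (by omega),
          show (3 : Int) + 1 = 4 from rfl,
          show segL A b1 4 (PySem.List.len A - 1) = [] from by
            unfold segL; rw [PySem.List.pyRange_one_eq_nil (by omega)]; rfl]
      rw [hbest0, hvs1eq]
      rfl
    · -- n ≥ 6: either no admissible pair sums to 0, or the first scan locks the best negative
      push Not at hn6
      have hmain : List.foldl istep none vs1 = some (minOf vs1) ∧ SimSafe A (minOf vs1) := by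
        rcases hpre with hz | hCex
        · -- no zero pair at all: the run never sees the value 0
          have hnz := no_zero_pair A hz
          have hvs1nz : ∀ v ∈ vs1, v ≠ 0 := by
            intro v hv
            rw [hvs1'] at hv
            obtain ⟨j, hj1, hj2, rfl⟩ := (mem_segL A b1 3 (PySem.List.len A - 1) v).mp hv
            exact hnz 1 j (by omega) (by omega) (by omega)
          exact ⟨foldA_none vs1 hvs1ne hvs1nz,
            Or.inr ⟨hnz, hvs1nz _ (minOf_mem vs1 hvs1ne)⟩⟩
        · -- a negative candidate with only positive ones before it: the i = 1 scan locks the best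
          obtain ⟨j0, hj0lt, hj03, hj0len, hj0neg, hj0pos⟩ := hCex
          have hb1eq : b1 = A.getD 1 0 := pyGetD_toNat A 1 (by omega) (by omega)
          have hsplitv : vs1 = segL A b1 3 (j0 : Int) ++
              ((b1 + PySem.List.pyGetD A (j0 : Int) 0) ::
                segL A b1 ((j0 : Int) + 1) (PySem.List.len A - 1)) := by
            rw [hvs1', segL_append A b1 3 (j0 : Int) (PySem.List.len A - 1)
              (by omega) (by omega),
              segL_cons A b1 (j0 : Int) (PySem.List.len A - 1) (by omega)]
          have hwneg : b1 + PySem.List.pyGetD A (j0 : Int) 0 < 0 := by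
            rw [hb1eq, pyGetD_toNat A (j0 : Int) (by omega) (by omega)]
            simpa using hj0neg
          have hPpos : ∀ v ∈ segL A b1 3 (j0 : Int), 0 < v := by
            intro v hv
            obtain ⟨j', hj1, hj2, rfl⟩ := (mem_segL A b1 3 (j0 : Int) v).mp hv
            rw [hb1eq, pyGetD_toNat A j' (by omega) (by omega)]
            have := hj0pos j'.toNat (by omega) (by omega)
            simpa using this
          constructor
          · rw [hsplitv, foldA_prefix _ _ _ hPpos hwneg, ← hsplitv]
          · left
            have hwmem : b1 + PySem.List.pyGetD A (j0 : Int) 0 ∈ vs1 := by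
              rw [hsplitv]
              exact List.mem_append_right _ List.mem_cons_self
            have := minOf_le vs1 _ hwmem
            omega
      rw [hmain.1]
      rw [fold_sim A _ (minOf vs1) hmain.2
        (fun i hi => by rw [PySem.List.mem_pyRange_one] at hi; exact ⟨by omega, hi.2⟩)]
      rw [hbest0]
      rfl
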